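-- pv_equiv track=rewrite | github.com/Chesedd/LightConductor | src/lightconductor/application/range_allocator.py | available_starts
-- ===== SOURCE A (Python) =====
-- from typing import Iterable, List, Tuple
--
-- def available_starts(
--     led_count: int, occupied_ranges: Iterable[Tuple[int, int]], length: int
-- ) -> List[int]:
--     if led_count <= 0 or length <= 0 or length > led_count:
--         return []
--
--     occupied = set()
--     for start, size in occupied_ranges:
--         for led in range(max(0, start), max(0, start) + max(0, size)):
--             occupied.add(led)
--
--     starts: List[int] = []
--     for start in range(0, led_count - length + 1):
--         candidate = range(start, start + length)
--         if all(led not in occupied for led in candidate):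
--             starts.append(start)
--     return starts
-- ===== SOURCE B (Python) =====
-- def available_starts(led_count, occupied_ranges, length):
--     if led_count <= 0 or length <= 0 or length > led_count:
--         return []
--     intervals = []
--     for start, size in occupied_ranges:
--         lo = max(0, start)
--         hi = lo + max(0, size)
--         if lo < hi:
--             intervals.append((lo, hi))
--     return [s for s in range(led_count - length + 1)
--             if all(hi <= s or s + length <= lo for lo, hi in intervals)]
-- ===== Notes on version B (the rewrite author's own statement) =====
-- stated objective: alternative
-- what changed: Instead of materialising every occupied LED cell into a set and scanning each window cell by cell, B clamps each occupied range to a half-open interval once and tests each candidate window by interval-disjointness arithmetic, with no per-cell work at all.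
import Mathlib
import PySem

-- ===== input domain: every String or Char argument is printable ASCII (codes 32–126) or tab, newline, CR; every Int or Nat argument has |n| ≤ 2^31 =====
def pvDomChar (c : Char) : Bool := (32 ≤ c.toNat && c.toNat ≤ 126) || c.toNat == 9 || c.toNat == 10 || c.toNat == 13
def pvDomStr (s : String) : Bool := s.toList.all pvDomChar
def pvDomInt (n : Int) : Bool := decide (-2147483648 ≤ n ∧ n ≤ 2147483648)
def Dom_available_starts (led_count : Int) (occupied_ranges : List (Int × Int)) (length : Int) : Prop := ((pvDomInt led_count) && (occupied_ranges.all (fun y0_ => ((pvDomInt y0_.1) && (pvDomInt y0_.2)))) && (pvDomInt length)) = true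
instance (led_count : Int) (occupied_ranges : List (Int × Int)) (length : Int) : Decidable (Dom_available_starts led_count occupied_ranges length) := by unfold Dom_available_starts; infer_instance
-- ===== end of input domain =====

-- B replaces A's per-cell occupied set and per-cell window scan by clamped intervals
-- and an interval-disjointness test per window (objective: alternative algorithm, similar cost).

-- ===== PORT A =====
def available_starts (led_count : Int) (occupied_ranges : List (Int × Int)) (length : Int) : List Int :=
  if led_count ≤ 0 ∨ length ≤ 0 ∨ length > led_count then []
  else
    let occupied : PySem.Set Int :=
      occupied_ranges.foldl (fun s p =>
        (PySem.List.pyRange (max 0 p.1) (max 0 p.1 + max 0 p.2) 1).foldl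
          (fun s led => PySem.Set.add s led) s) PySem.Set.empty
    (PySem.List.pyRange 0 (led_count - length + 1) 1).foldl (fun starts start =>
      if (PySem.List.pyRange start (start + length) 1).all
           (fun led => !(PySem.Set.contains occupied led)) then starts ++ [start]
      else starts) []

-- ===== PORT B =====
def available_starts_alt (led_count : Int) (occupied_ranges : List (Int × Int)) (length : Int) : List Int :=
  if led_count ≤ 0 ∨ length ≤ 0 ∨ length > led_count then []
  else
    let intervals : List (Int × Int) :=
      occupied_ranges.foldl (fun acc p =>
        if max 0 p.1 < max 0 p.1 + max 0 p.2 then acc ++ [(max 0 p.1, max 0 p.1 + max 0 p.2)]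
        else acc) []
    (PySem.List.pyRange 0 (led_count - length + 1) 1).filter (fun s =>
      intervals.all (fun iv => decide (iv.2 ≤ s) || decide (s + length ≤ iv.1)))

-- ===== PRECONDITION & SPEC =====
def Spec_available_starts (led_count : Int) (occupied_ranges : List (Int × Int)) (length : Int) (out : List Int) : Prop := out = available_starts_alt led_count occupied_ranges length
instance (led_count : Int) (occupied_ranges : List (Int × Int)) (length : Int) (out : List Int) : Decidable (Spec_available_starts led_count occupied_ranges length out) := by unfold Spec_available_starts; infer_instance

-- ===== CLAIM (what is proved, stated in full; the proofs are below) =====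
def Claim_equal_available_starts : Prop := ∀ (led_count : Int) (occupied_ranges : List (Int × Int)) (length : Int), Dom_available_starts led_count occupied_ranges length → Spec_available_starts led_count occupied_ranges length (available_starts led_count occupied_ranges length)

-- ===== LEMMAS AND PROOFS =====

-- membership in A's occupied set: covered by some (clamped, nonempty) range
lemma mem_occupied_iff (occ : List (Int × Int)) (s0 : PySem.Set Int) (y : Int) :
    y ∈ occ.foldl (fun s p =>
        (PySem.List.pyRange (max 0 p.1) (max 0 p.1 + max 0 p.2) 1).foldl
          (fun s led => PySem.Set.add s led) s) s0 ↔
      y ∈ s0 ∨ ∃ p ∈ occ, max 0 p.1 ≤ y ∧ y < max 0 p.1 + max 0 p.2 := by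
  induction occ generalizing s0 with
  | nil => simp
  | cons p t ih =>
    simp only [List.foldl_cons, ih]
    have : ∀ (s : PySem.Set Int),
        y ∈ (PySem.List.pyRange (max 0 p.1) (max 0 p.1 + max 0 p.2) 1).foldl
              (fun s led => PySem.Set.add s led) s ↔
          y ∈ s ∨ (max 0 p.1 ≤ y ∧ y < max 0 p.1 + max 0 p.2) := by
      intro s
      rw [show ((PySem.List.pyRange (max 0 p.1) (max 0 p.1 + max 0 p.2) 1).foldl
              (fun s led => PySem.Set.add s led) s)
            = (PySem.List.pyRange (max 0 p.1) (max 0 p.1 + max 0 p.2) 1).foldl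
              (fun s led => PySem.Set.add s (id led)) s from rfl,
          PySem.Set.mem_foldl_add]
      simp [PySem.List.mem_pyRange_one]
    rw [this]
    simp only [List.mem_cons]
    constructor
    · rintro (⟨h | h⟩ | ⟨q, hq, h⟩)
      · exact Or.inl h
      · exact Or.inr ⟨p, Or.inl rfl, h⟩
      · exact Or.inr ⟨q, Or.inr hq, h⟩
    · rintro (h | ⟨q, (rfl | hq), h⟩)
      · exact Or.inl (Or.inl h)
      · exact Or.inl (Or.inr h)
      · exact Or.inr ⟨q, hq, h⟩

-- B's interval list: the clamped nonempty ranges, in order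
lemma intervals_eq (occ : List (Int × Int)) :
    occ.foldl (fun acc p =>
        if max 0 p.1 < max 0 p.1 + max 0 p.2 then acc ++ [(max 0 p.1, max 0 p.1 + max 0 p.2)]
        else acc) [] =
      (occ.filter (fun p => decide (max 0 p.1 < max 0 p.1 + max 0 p.2))).map
        (fun p => (max 0 p.1, max 0 p.1 + max 0 p.2)) := by
  have h : ∀ (acc : List (Int × Int)),
      occ.foldl (fun acc p =>
          if max 0 p.1 < max 0 p.1 + max 0 p.2 then acc ++ [(max 0 p.1, max 0 p.1 + max 0 p.2)]
          else acc) acc =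
        acc ++ (occ.filter (fun p => decide (max 0 p.1 < max 0 p.1 + max 0 p.2))).map
          (fun p => (max 0 p.1, max 0 p.1 + max 0 p.2)) := by
    induction occ with
    | nil => simp
    | cons p t ih =>
      intro acc
      by_cases hc : max 0 p.1 < max 0 p.1 + max 0 p.2
      · rw [List.foldl_cons, if_pos hc, ih, List.filter_cons_of_pos (by simpa using hc)]
        simp
      · rw [List.foldl_cons, if_neg hc, ih, List.filter_cons_of_neg (by simpa using hc)]
  simpa using h []

theorem available_starts_spec : Claim_equal_available_starts := by
  intro led_count occ length _
  unfold Spec_available_starts available_starts available_starts_alt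
  split
  · rfl
  · rename_i hguard
    rw [PySem.List.foldl_append_if_eq_filter, List.nil_append, intervals_eq]
    apply List.filter_congr
    intro s hs
    have hlen : 0 < length := by push Not at hguard; omega
    rw [Bool.eq_iff_iff]
    simp only [List.all_eq_true, List.mem_map, List.mem_filter, Bool.not_eq_eq_eq_not,
      Bool.not_true, decide_eq_true_eq, Bool.or_eq_true]
    rw [show (∀ led ∈ PySem.List.pyRange s (s + length) 1,
          PySem.Set.contains
            (occ.foldl (fun s p =>
                (PySem.List.pyRange (max 0 p.1) (max 0 p.1 + max 0 p.2) 1).foldl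
                  (fun s led => PySem.Set.add s led) s) PySem.Set.empty) led = false) ↔
        (∀ led ∈ PySem.List.pyRange s (s + length) 1,
          ¬ ∃ p ∈ occ, max 0 p.1 ≤ led ∧ led < max 0 p.1 + max 0 p.2) from by
      apply forall₂_congr
      intro led _
      rw [← Bool.not_eq_true, PySem.Set.contains_iff, mem_occupied_iff]
      simp [PySem.Set.empty]]
    constructor
    · rintro h ⟨lo, hi⟩ ⟨p, ⟨hp, hne⟩, heq⟩
      by_contra hcon
      push Not at hcon
      simp only at hcon
      injection heq with h1 h2
      refine h (max s lo) ?_ ⟨p, hp, by omega⟩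
      rw [PySem.List.mem_pyRange_one]
      omega
    · intro h led hled ⟨p, hp, hcov⟩
      rw [PySem.List.mem_pyRange_one] at hled
      by_cases hne : max 0 p.1 < max 0 p.1 + max 0 p.2
      · have := h (max 0 p.1, max 0 p.1 + max 0 p.2) ⟨p, ⟨hp, by simpa using hne⟩, rfl⟩
        omega
      · omega
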